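-- pv_equiv track=rewrite | github.com/MrBrantCode/unitest_baseline | mut_generate/mist_train_cf/cf_76459/solution.py | hex_matrix_sequence
-- ===== SOURCE A (Python) =====
-- from itertools import product
--
-- def hex_matrix_sequence(matrix, target_product):
--     """
--     This function finds and returns a sequence of digits in the matrix that,
--     when multiplied together, produce the target product.
--
--     Args:
--     matrix (list): A 2D list of hexadecimal digits.
--     target_product (int): The target product.
--
--     Returns:
--     list or None: A list of digits that multiply to the target product, or None if no such sequence exists.
--     """
--
--     # Generate all possible sequences of digits from the matrix
--     sequences = list(product(*matrix))
--
--     # Iterate over each sequence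
--     for sequence in sequences:
--         # Convert each digit from hexadecimal to integer
--         digits = [int(digit, 16) for digit in sequence]
--
--         # Calculate the product of the digits
--         product_of_digits = 1
--         for digit in digits:
--             product_of_digits *= digit
--
--         # Check if the product of the digits equals the target product
--         if product_of_digits == target_product:
--             return list(sequence)
--
--     # If no sequence is found, return None
--     return None
-- ===== SOURCE B (Python) =====
-- def hex_matrix_sequence(matrix, target_product):
--     """Row-by-row backtracking on the remaining quotient: a digit is explored
--     only if it divides the remainder exactly (zero digits only when the
--     remainder is 0), so the full cartesian product is never materialised.
--     Returns the same first sequence (itertools.product order) as the brute force."""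
--
--     if any(not row for row in matrix):
--         return None  # an empty row admits no sequence at all
--
--     def first_elems(rows):
--         # first completion of the remaining rows (any completion works)
--         tail = []
--         for row in rows:
--             if not row:
--                 return None
--             tail.append(row[0])
--         return tail
--
--     def dfs(rows, rem):
--         if not rows:
--             return [] if rem == 1 else None
--         row, rest = rows[0], rows[1:]
--         for d in row:
--             v = int(d, 16)
--             if v == 0:
--                 if rem == 0:
--                     tail = first_elems(rest)
--                     if tail is not None:
--                         return [d] + tail
--             elif rem % v == 0:
--                 tail = dfs(rest, rem // v)
--                 if tail is not None:
--                     return [d] + tail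
--         return None
--
--     return dfs(matrix, target_product)
-- ===== Notes on version B (the rewrite author's own statement) =====
-- stated objective: faster
-- what changed: A materialises the full cartesian product of the rows and scans it, re-parsing and re-multiplying every sequence; B backtracks row by row on the remaining quotient, exploring a digit only when it divides the remainder exactly (zero digits only when the remainder is 0), never building the product list.
-- outside the precondition, e.g. on hex_matrix_sequence([['3'], ['x', '2']], 4): A raises ValueError, B returns None; on hex_matrix_sequence([['3'], ['2', 'x']], 6): A returns ['3', '2'], B returns ['3', '2']
import Mathlib
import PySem

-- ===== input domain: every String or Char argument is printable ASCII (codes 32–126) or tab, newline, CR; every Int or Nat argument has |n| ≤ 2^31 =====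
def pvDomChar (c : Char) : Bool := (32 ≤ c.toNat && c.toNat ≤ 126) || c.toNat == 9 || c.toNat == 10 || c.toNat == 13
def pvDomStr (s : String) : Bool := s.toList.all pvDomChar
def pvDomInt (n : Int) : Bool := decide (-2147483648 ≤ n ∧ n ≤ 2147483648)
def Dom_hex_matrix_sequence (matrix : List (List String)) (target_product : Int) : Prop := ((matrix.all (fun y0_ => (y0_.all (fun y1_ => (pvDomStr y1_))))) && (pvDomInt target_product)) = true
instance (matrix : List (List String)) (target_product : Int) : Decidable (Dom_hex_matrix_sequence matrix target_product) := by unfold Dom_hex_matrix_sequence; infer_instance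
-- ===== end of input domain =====

-- B replaces A's materialised cartesian-product scan by row-by-row backtracking that
-- prunes each digit by exact divisibility of the remaining quotient (objective: faster).


-- int(s, 16): PySem primitive, none = ValueError (used by both Pythons)
def pvParse (s : String) : Option Int := PySem.Int.ofStrBase? s 16

-- ===== PORT A =====
-- itertools.product(*matrix), in product order (hand port, exact: first row varies slowest)
def pvCart : List (List String) → List (List String)
  | [] => [[]]
  | r :: rs => r.flatMap (fun d => (pvCart rs).map (fun seq => d :: seq))

-- the 'for sequence in sequences' loop: parse the digits, multiply, compare
def pvScanA : List (List String) → Int → Option (List String)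
  | [], _ => none
  | seq :: rest, t =>
    match seq.mapM pvParse with
    | none => none   -- int(digit, 16) raises ValueError: outside Pre_
    | some ds => if ds.foldl (· * ·) 1 = t then some seq else pvScanA rest t

def hex_matrix_sequence (matrix : List (List String)) (target_product : Int) : Option (List String) :=
  pvScanA (pvCart matrix) target_product

-- ===== PORT B =====
-- first_elems(rows): first completion of the remaining rows
def pvFirstElems : List (List String) → Option (List String)
  | [] => some []
  | row :: rs =>
    match row with
    | [] => none
    | d :: _ => (pvFirstElems rs).map (fun tail => d :: tail)

-- dfs(rows, rem) and its 'for d in row' loop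
mutual
def pvDfs : List (List String) → Int → Option (List String)
  | [], rem => if rem = 1 then some [] else none
  | row :: rest, rem => pvTryRow row rest rem
termination_by rows _ => (2 * rows.length + 1, 0)
def pvTryRow : List String → List (List String) → Int → Option (List String)
  | [], _, _ => none
  | d :: ds, rest, rem =>
    match pvParse d with
    | none => none   -- int(d, 16) raises ValueError: outside Pre_
    | some v =>
      if v = 0 then
        if rem = 0 then
          match pvFirstElems rest with
          | some tail => some (d :: tail)
          | none => pvTryRow ds rest rem
        else pvTryRow ds rest rem
      else if PySem.Int.mod rem v = 0 then
        match pvDfs rest (PySem.Int.floordiv rem v) with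
        | some tail => some (d :: tail)
        | none => pvTryRow ds rest rem
      else pvTryRow ds rest rem
termination_by ds rest _ => (2 * rest.length + 2, ds.length)
end

def hex_matrix_sequence_alt (matrix : List (List String)) (target_product : Int) : Option (List String) :=
  if matrix.any List.isEmpty then none   -- an empty row admits no sequence at all
  else pvDfs matrix target_product

-- ===== PRECONDITION & SPEC =====
-- Pre_ excludes matrices that have no empty row yet contain a string that is not a
-- valid base-16 integer literal: there int(d, 16) raises ValueError, and whether A's
-- scan reaches the bad string before a match (raising) or not is an accident of scan
-- order that B's pruned search does not reproduce. (With an empty row A parses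
-- nothing and returns None, so those inputs stay inside Pre_.)
def Pre_hex_matrix_sequence (matrix : List (List String)) (target_product : Int) : Prop :=
  -- e.g. digits "0", "1", "2", "3", "a", "b", "c", "f" parse (with int("a",16) = 10,
  -- int("b",16) = 11, int("c",16) = 12); "x_y" or "" raise ValueError
  (∃ row ∈ matrix, row = []) ∨ (∀ row ∈ matrix, ∀ s ∈ row, (pvParse s).isSome)
instance (matrix : List (List String)) (target_product : Int) : Decidable (Pre_hex_matrix_sequence matrix target_product) := by unfold Pre_hex_matrix_sequence; infer_instance
def pvWitness_hex_matrix_sequence : List (List String) × Int := ([["2", "a"], ["3", "1"]], 6)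

def Spec_hex_matrix_sequence (matrix : List (List String)) (target_product : Int) (out : Option (List String)) : Prop := out = hex_matrix_sequence_alt matrix target_product
instance (matrix : List (List String)) (target_product : Int) (out : Option (List String)) : Decidable (Spec_hex_matrix_sequence matrix target_product out) := by unfold Spec_hex_matrix_sequence; infer_instance

-- ===== CLAIM (what is proved, stated in full; the proofs are below) =====
def Claim_equal_hex_matrix_sequence : Prop := ∀ (matrix : List (List String)) (target_product : Int), Dom_hex_matrix_sequence matrix target_product → Pre_hex_matrix_sequence matrix target_product → Spec_hex_matrix_sequence matrix target_product (hex_matrix_sequence matrix target_product)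

-- ===== LEMMAS AND PROOFS =====

theorem pv_foldl_mul (a : Int) (l : List Int) : l.foldl (· * ·) a = a * l.foldl (· * ·) 1 := by
  induction l generalizing a with
  | nil => simp
  | cons x xs ih => simp only [List.foldl_cons]; rw [ih (a * x), ih (1 * x)]; ring

theorem pv_mapM_isSome (seq : List String) (h : ∀ s ∈ seq, (pvParse s).isSome) :
    ∃ ds, seq.mapM pvParse = some ds := by
  induction seq with
  | nil => exact ⟨[], rfl⟩
  | cons s ss ih =>
    obtain ⟨v, hv⟩ := Option.isSome_iff_exists.mp (h s List.mem_cons_self)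
    obtain ⟨ds, hds⟩ := ih (fun x hx => h x (List.mem_cons_of_mem _ hx))
    exact ⟨v :: ds, by simp [List.mapM_cons, hv, hds]⟩

theorem pv_cart_mem (rs : List (List String)) (seq : List String) (h : seq ∈ pvCart rs) :
    ∀ s ∈ seq, ∃ row ∈ rs, s ∈ row := by
  induction rs generalizing seq with
  | nil => simp [pvCart] at h; subst h; simp
  | cons r rs ih =>
    simp only [pvCart, List.mem_flatMap, List.mem_map] at h
    obtain ⟨d, hd, tail, htail, rfl⟩ := h
    intro s hs
    rcases List.mem_cons.mp hs with rfl | hs'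
    · exact ⟨r, List.mem_cons_self, hd⟩
    · obtain ⟨row, hrow, hsrow⟩ := ih tail htail s hs'
      exact ⟨row, List.mem_cons_of_mem _ hrow, hsrow⟩

theorem pv_firstElems_eq_head (rs : List (List String)) : pvFirstElems rs = (pvCart rs).head? := by
  induction rs with
  | nil => simp [pvFirstElems, pvCart]
  | cons row rs ih =>
    cases row with
    | nil => simp [pvFirstElems, pvCart]
    | cons d ds =>
      simp only [pvFirstElems, pvCart, List.flatMap_cons]
      cases hc : pvCart rs with
      | nil =>
        simp [hc] at ih
        simp only [List.map_nil, ih, Option.map_none]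
        rw [eq_comm, List.head?_eq_none_iff]
        simp
      | cons c cs => simp [hc] at ih ⊢; simp [ih]

theorem pv_scan_append (L1 L2 : List (List String)) (t : Int)
    (h : ∀ seq ∈ L1, ∀ s ∈ seq, (pvParse s).isSome) :
    pvScanA (L1 ++ L2) t = (pvScanA L1 t).or (pvScanA L2 t) := by
  induction L1 with
  | nil => simp [pvScanA]
  | cons seq L1 ih =>
    obtain ⟨ds, hds⟩ := pv_mapM_isSome seq (h seq List.mem_cons_self)
    simp only [List.cons_append, pvScanA, hds]
    split
    · simp
    · exact ih (fun q hq => h q (List.mem_cons_of_mem _ hq))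

-- scanning the block of sequences that start with digit d = one pruned step on d
theorem pv_scan_map (d : String) (v : Int) (hv : pvParse d = some v) (L : List (List String)) (rem : Int)
    (hL : ∀ seq ∈ L, ∀ s ∈ seq, (pvParse s).isSome) :
    pvScanA (L.map (fun seq => d :: seq)) rem =
      if v = 0 then (if rem = 0 then (L.head?).map (fun seq => d :: seq) else none)
      else if PySem.Int.mod rem v = 0 then (pvScanA L (PySem.Int.floordiv rem v)).map (fun seq => d :: seq)
      else none := by
  induction L generalizing rem with
  | nil => simp only [List.map_nil, pvScanA]; split_ifs <;> rfl
  | cons seq L ih =>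
    obtain ⟨vs, hvs⟩ := pv_mapM_isSome seq (hL seq List.mem_cons_self)
    have hL' : ∀ q ∈ L, ∀ s ∈ q, (pvParse s).isSome :=
      fun q hq => hL q (List.mem_cons_of_mem _ hq)
    have hmapM : (d :: seq).mapM pvParse = some (v :: vs) := by
      simp [List.mapM_cons, hv, hvs]
    have hprod : (v :: vs).foldl (· * ·) 1 = v * vs.foldl (· * ·) 1 := by
      simp only [List.foldl_cons]; rw [pv_foldl_mul (1 * v)]; ring
    simp only [List.map_cons, pvScanA, hmapM, hvs, hprod]
    by_cases hv0 : v = 0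
    · subst hv0
      by_cases hrem : rem = 0
      · subst hrem; simp
      · have h1 : ¬ (0 * vs.foldl (· * ·) 1 = rem) := by
          rw [zero_mul]; exact fun he => hrem he.symm
        rw [if_neg h1, ih rem hL']
        simp [hrem]
    · have hdvd := PySem.Int.mod_eq_zero_iff_dvd rem v
      by_cases hmod : PySem.Int.mod rem v = 0
      · have hqv : PySem.Int.floordiv rem v * v = rem := by
          have := PySem.Int.floordiv_mul_add_mod rem v
          omega
        by_cases hp : vs.foldl (· * ·) 1 = PySem.Int.floordiv rem v
        · have h2 : v * PySem.Int.floordiv rem v = rem := by rw [mul_comm]; exact hqv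
          simp [hv0, hmod, hp, h2]
        · have hne : ¬ v * vs.foldl (· * ·) 1 = rem := by
            intro he
            have h3 : v * vs.foldl (· * ·) 1 = v * PySem.Int.floordiv rem v := by
              rw [he, mul_comm]; exact hqv.symm
            exact hp (mul_left_cancel₀ hv0 h3)
          simp only [if_neg hv0, if_pos hmod, if_neg hne, if_neg hp]
          rw [ih rem hL']
          simp [hv0, hmod]
      · have hne : ¬ v * vs.foldl (· * ·) 1 = rem := by
          intro he
          exact hmod (hdvd.mpr ⟨vs.foldl (· * ·) 1, he.symm⟩)
        simp only [if_neg hv0, if_neg hmod, if_neg hne]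
        rw [ih rem hL']
        simp [hv0, hmod]

theorem pv_row (row : List String) (rs : List (List String)) (rem : Int)
    (hrow : ∀ s ∈ row, (pvParse s).isSome)
    (hcart : ∀ seq ∈ pvCart rs, ∀ s ∈ seq, (pvParse s).isSome)
    (ihdfs : ∀ r : Int, pvScanA (pvCart rs) r = pvDfs rs r) :
    pvScanA (row.flatMap (fun d => (pvCart rs).map (fun seq => d :: seq))) rem
      = pvTryRow row rs rem := by
  induction row with
  | nil => simp [pvScanA, pvTryRow]
  | cons d ds ih =>
    obtain ⟨v, hv⟩ := Option.isSome_iff_exists.mp (hrow d List.mem_cons_self)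
    have hds : ∀ s ∈ ds, (pvParse s).isSome := fun s hs => hrow s (List.mem_cons_of_mem _ hs)
    have hmapped : ∀ seq ∈ (pvCart rs).map (fun seq => d :: seq), ∀ s ∈ seq, (pvParse s).isSome := by
      intro seq hseq s hs
      obtain ⟨tail, htail, rfl⟩ := List.mem_map.mp hseq
      rcases List.mem_cons.mp hs with rfl | hs'
      · exact Option.isSome_iff_exists.mpr ⟨v, hv⟩
      · exact hcart tail htail s hs'
    rw [List.flatMap_cons, pv_scan_append _ _ _ hmapped,
        pv_scan_map d v hv _ rem hcart, ih hds]
    simp only [pvTryRow, hv]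
    by_cases hv0 : v = 0
    · subst hv0
      by_cases hrem : rem = 0
      · subst hrem
        rw [pv_firstElems_eq_head]
        cases (pvCart rs).head? <;> simp
      · simp [hrem]
    · by_cases hmod : PySem.Int.mod rem v = 0
      · rw [ihdfs]
        simp only [if_neg hv0, if_pos hmod]
        cases pvDfs rs (PySem.Int.floordiv rem v) <;> simp
      · simp [hv0, hmod]

theorem pv_main (matrix : List (List String)) (t : Int)
    (h : ∀ row ∈ matrix, ∀ s ∈ row, (pvParse s).isSome) :
    pvScanA (pvCart matrix) t = pvDfs matrix t := by
  induction matrix generalizing t with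
  | nil =>
    simp only [pvCart, pvScanA, pvDfs, List.mapM_nil, List.foldl_nil]
    by_cases ht : t = 1
    · subst ht; simp
    · simp [ht, Ne.symm ht]
  | cons row rs ih =>
    have hrow : ∀ s ∈ row, (pvParse s).isSome := h row List.mem_cons_self
    have hrs : ∀ r ∈ rs, ∀ s ∈ r, (pvParse s).isSome :=
      fun r hr => h r (List.mem_cons_of_mem _ hr)
    have hcart : ∀ seq ∈ pvCart rs, ∀ s ∈ seq, (pvParse s).isSome := by
      intro seq hseq s hs
      obtain ⟨r, hr, hsr⟩ := pv_cart_mem rs seq hseq s hs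
      exact hrs r hr s hsr
    simp only [pvCart, pvDfs]
    exact pv_row row rs t hrow hcart (fun r => ih r hrs)

theorem pv_cart_nil (m : List (List String)) (h : ∃ row ∈ m, row = []) : pvCart m = [] := by
  induction m with
  | nil => simp at h
  | cons r rs ih =>
    rcases h with ⟨row, hrow, hnil⟩
    rcases List.mem_cons.mp hrow with rfl | hmem
    · subst hnil; simp [pvCart]
    · simp [pvCart, ih ⟨row, hmem, hnil⟩]

-- ===== VERDICT (by name: the statement is the Claim_ definition above) =====
theorem hex_matrix_sequence_spec : Claim_equal_hex_matrix_sequence := by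
  intro matrix t _ hpre
  unfold Spec_hex_matrix_sequence hex_matrix_sequence hex_matrix_sequence_alt
  by_cases hg : matrix.any List.isEmpty
  · have hempty : ∃ row ∈ matrix, row = [] := by
      obtain ⟨row, hrow, he⟩ := List.any_eq_true.mp hg
      exact ⟨row, hrow, List.isEmpty_iff.mp he⟩
    simp [hg, pv_cart_nil matrix hempty, pvScanA]
  · have hall : ∀ row ∈ matrix, ∀ s ∈ row, (pvParse s).isSome := by
      rcases hpre with hempty | hall
      · exfalso
        obtain ⟨row, hrow, hnil⟩ := hempty
        exact hg (List.any_eq_true.mpr ⟨row, hrow, by simp [hnil]⟩)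
      · exact hall
    simp only [hg, if_false, Bool.false_eq_true]
    exact pv_main matrix t hall
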